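-- pv_equiv track=rewrite | github.com/UryxSoft/citation_style_detector | citation_detector/core/detector.py | _find_references_without_citations
-- ===== SOURCE A (Python) =====
-- from typing import Dict, List, Tuple, Any, Optional, Union
--
-- def _find_references_without_citations(citations: List[Tuple[str, str]],
--                                      references: List[Dict[str, str]],
--                                      style: str) -> List[Dict[str, str]]:
--     """
--     Encuentra entradas bibliográficas que no están citadas en el texto.
--
--     Args:
--         citations (List[Tuple[str, str]]): Lista de citas en texto (autor, año)
--         references (List[Dict[str, str]]): Lista de entradas bibliográficas
--         style (str): Estilo de citación
--
--     Returns: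
--         List[Dict[str, str]]: Lista de referencias no citadas
--     """
--     unused = []
--
--     for ref in references:
--         cited = False
--
--         # Extraer autor y año de la referencia
--         ref_author = ref.get('author', '')
--         if ref_author:
--             ref_author = ref_author.split(',')[0].strip()
--
--         ref_year = ref.get('year', '')
--
--         for author, year in citations:
--             # Comparar según el estilo
--             if style in ["APA", "HARVARD", "CHICAGO"]:
--                 if author and ref_author and year and ref_year:
--                     # Normalizar para comparación
--                     author_norm = author.lower().replace('et al.', '').strip()
--                     ref_author_norm = ref_author.lower().strip()
--
--                     if author_norm in ref_author_norm or ref_author_norm in author_norm: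
--                         if year == ref_year:
--                             cited = True
--                             break
--
--             elif style == "MLA":
--                 # En MLA solo comparamos autor (apellido)
--                 if author and ref_author:
--                     # Normalizar para comparación
--                     author_norm = author.lower().replace('et al.', '').strip()
--                     ref_author_norm = ref_author.lower().strip()
--
--                     if author_norm in ref_author_norm or ref_author_norm in author_norm:
--                         cited = True
--                         break
--
--         if not cited and ref_author.strip():  # Evitar falsos positivos
--             unused.append(ref)
--
--     return unused
-- ===== SOURCE B (Python) =====
-- def _find_references_without_citations(citations, references, style):
--     """Index citations once (by year for year-bearing styles, flat for MLA),
--     then a single pass over references; same result as the nested-scan original."""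
--     def norm(a):
--         return a.lower().replace('et al.', '').strip()
--
--     year_styles = style in ("APA", "HARVARD", "CHICAGO")
--     buckets = {}
--     flat = []
--     if year_styles:
--         for author, year in citations:
--             if author and year:
--                 buckets.setdefault(year, []).append(norm(author))
--     elif style == "MLA":
--         flat = [norm(author) for author, _ in citations if author]
--
--     unused = []
--     for ref in references:
--         ra = ref.get('author', '')
--         if ra:
--             ra = ra.split(',')[0].strip()
--         if not ra:
--             continue
--         rn = ra.lower().strip()
--         pool = buckets.get(ref.get('year', ''), []) if year_styles else flat
--         if not any(a in rn or rn in a for a in pool):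
--             unused.append(ref)
--     return unused
-- ===== Notes on version B (the rewrite author's own statement) =====
-- stated objective: alternative
-- what changed: A rescans and re-normalizes the whole citation list inside the loop over references; B makes one pass over the citations to build a year-keyed dict of normalized citation authors (a flat normalized list for MLA) and then, per reference, scans only the bucket for that reference's year (the flat list for MLA), keeping references in order.
import Mathlib
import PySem

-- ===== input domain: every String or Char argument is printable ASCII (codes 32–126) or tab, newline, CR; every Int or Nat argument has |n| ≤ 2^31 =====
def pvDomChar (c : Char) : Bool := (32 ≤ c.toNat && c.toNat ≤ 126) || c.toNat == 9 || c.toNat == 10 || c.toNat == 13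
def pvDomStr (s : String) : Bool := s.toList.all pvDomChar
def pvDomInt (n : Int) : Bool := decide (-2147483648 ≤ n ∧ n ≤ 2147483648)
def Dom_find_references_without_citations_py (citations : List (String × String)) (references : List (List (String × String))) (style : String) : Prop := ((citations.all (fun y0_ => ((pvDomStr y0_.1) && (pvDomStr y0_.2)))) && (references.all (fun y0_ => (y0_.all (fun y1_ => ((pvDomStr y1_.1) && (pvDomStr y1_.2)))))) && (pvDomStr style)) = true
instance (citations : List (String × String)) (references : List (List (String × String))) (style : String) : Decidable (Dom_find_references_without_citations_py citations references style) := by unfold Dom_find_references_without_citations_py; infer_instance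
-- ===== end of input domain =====

-- B replaces A's per-reference rescan of all citations by a one-pass index of the
-- citations (a year-keyed dict for APA/HARVARD/CHICAGO, a flat list for MLA),
-- looked up once per reference; same return value (alternative decomposition).

-- ===== PORT A =====
-- inner 'for author, year in citations' loop of A; the early 'break' is the early 'true'
def pvCitedLoop (style ref_author ref_year : String) : List (String × String) → Bool
  | [] => false
  | (author, year) :: rest =>
    if style = "APA" ∨ style = "HARVARD" ∨ style = "CHICAGO" then
      if author ≠ "" ∧ ref_author ≠ "" ∧ year ≠ "" ∧ ref_year ≠ "" then
        let author_norm := PySem.Str.strip (PySem.Str.replace (PySem.Str.lower author) "et al." "")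
        let ref_author_norm := PySem.Str.strip (PySem.Str.lower ref_author)
        if PySem.Str.isIn author_norm ref_author_norm || PySem.Str.isIn ref_author_norm author_norm then
          if year = ref_year then true
          else pvCitedLoop style ref_author ref_year rest
        else pvCitedLoop style ref_author ref_year rest
      else pvCitedLoop style ref_author ref_year rest
    else if style = "MLA" then
      if author ≠ "" ∧ ref_author ≠ "" then
        let author_norm := PySem.Str.strip (PySem.Str.replace (PySem.Str.lower author) "et al." "")
        let ref_author_norm := PySem.Str.strip (PySem.Str.lower ref_author)
        if PySem.Str.isIn author_norm ref_author_norm || PySem.Str.isIn ref_author_norm author_norm then true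
        else pvCitedLoop style ref_author ref_year rest
      else pvCitedLoop style ref_author ref_year rest
    else pvCitedLoop style ref_author ref_year rest

def find_references_without_citations_py (citations : List (String × String)) (references : List (List (String × String))) (style : String) : List (List (String × String)) :=
  references.foldl (fun unused ref =>
    let ref_author0 := (PySem.Dict.mk ref).getD "author" ""
    let ref_author := if ref_author0 ≠ "" then PySem.Str.strip (((PySem.Str.split? ref_author0 ",").getD []).headD "") else ref_author0
    let ref_year := (PySem.Dict.mk ref).getD "year" ""
    let cited := pvCitedLoop style ref_author ref_year citations
    if cited = false ∧ PySem.Str.strip ref_author ≠ "" then unused ++ [ref] else unused) []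

-- ===== PORT B =====
def pvNorm (a : String) : String := PySem.Str.strip (PySem.Str.replace (PySem.Str.lower a) "et al." "")

def find_references_without_citations_py_alt (citations : List (String × String)) (references : List (List (String × String))) (style : String) : List (List (String × String)) :=
  let yearStyles : Bool := style == "APA" || style == "HARVARD" || style == "CHICAGO"
  let buckets : PySem.Dict String (List String) :=
    if yearStyles then
      citations.foldl (fun d p =>
        if p.1 ≠ "" ∧ p.2 ≠ "" then d.modify p.2 [] (fun l => l ++ [pvNorm p.1]) else d) PySem.Dict.empty
    else PySem.Dict.empty
  let flat : List String :=
    if style == "MLA" then citations.filterMap (fun p => if p.1 ≠ "" then some (pvNorm p.1) else none) else []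
  references.filter (fun ref =>
    let ra0 := (PySem.Dict.mk ref).getD "author" ""
    let ra := if ra0 ≠ "" then PySem.Str.strip (((PySem.Str.split? ra0 ",").getD []).headD "") else ra0
    if ra = "" then false
    else
      let rn := PySem.Str.strip (PySem.Str.lower ra)
      let pool := if yearStyles then buckets.getD ((PySem.Dict.mk ref).getD "year" "") [] else flat
      !(pool.any (fun an => PySem.Str.isIn an rn || PySem.Str.isIn rn an)))

-- ===== PRECONDITION & SPEC =====
def Spec_find_references_without_citations_py (citations : List (String × String)) (references : List (List (String × String))) (style : String) (out : List (List (String × String))) : Prop := out = find_references_without_citations_py_alt citations references style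
instance (citations : List (String × String)) (references : List (List (String × String))) (style : String) (out : List (List (String × String))) : Decidable (Spec_find_references_without_citations_py citations references style out) := by unfold Spec_find_references_without_citations_py; infer_instance

-- ===== CLAIM (what is proved, stated in full; the proofs are below) =====
def Claim_equal_find_references_without_citations_py : Prop := ∀ (citations : List (String × String)) (references : List (List (String × String))) (style : String), Dom_find_references_without_citations_py citations references style → Spec_find_references_without_citations_py citations references style (find_references_without_citations_py citations references style)

-- ===== LEMMAS AND PROOFS =====

lemma pv_dropWhile_of_head (p : Char → Bool) (x : List Char)
    (h : ∀ a, x.head? = some a → p a = false) : List.dropWhile p x = x := by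
  cases x with
  | nil => rfl
  | cons a t => simp [h a rfl]

lemma pv_head_dropWhile (p : Char → Bool) (l : List Char) (a : Char)
    (h : (List.dropWhile p l).head? = some a) : p a = false := by
  have h2 := List.head?_dropWhile_not p l
  rw [h] at h2
  exact h2

lemma pv_strip_idem_chars (l : List Char) :
    PySem.Chars.strip (PySem.Chars.strip l) = PySem.Chars.strip l := by
  unfold PySem.Chars.strip PySem.Chars.rstrip PySem.Chars.lstrip
  set p := PySem.Chars.isspace with hp
  set A := List.dropWhile p l with hA
  set S := List.dropWhile p A.reverse with hS
  -- goal: (dropWhile p (dropWhile p S.reverse).reverse).reverse = S.reverse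
  have h1 : List.dropWhile p S.reverse = S.reverse := by
    apply pv_dropWhile_of_head
    intro a ha
    rw [List.head?_reverse] at ha
    -- ha : S.getLast? = some a
    have hSne : S ≠ [] := by intro hn; rw [hn] at ha; simp at ha
    obtain ⟨t, ht⟩ := List.dropWhile_suffix (l := A.reverse) p
    rw [← hS] at ht
    have : A.reverse.getLast? = some a := by rw [← ht, List.getLast?_append_of_ne_nil t hSne]; exact ha
    rw [List.getLast?_reverse] at this
    exact pv_head_dropWhile p l a (by rw [← hA, this])
  rw [h1, List.reverse_reverse]
  rw [List.dropWhile_idempotent]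

lemma pv_strip_idem (s : String) :
    PySem.Str.strip (PySem.Str.strip s) = PySem.Str.strip s := by
  apply String.toList_inj.mp
  rw [PySem.Str.toList_strip, PySem.Str.toList_strip]
  exact pv_strip_idem_chars s.toList
lemma pv_strip_empty : PySem.Str.strip "" = "" := rfl

lemma pv_buckets_getD (cits : List (String × String)) (d : PySem.Dict String (List String)) (y : String) :
    (cits.foldl (fun d p =>
        if p.1 ≠ "" ∧ p.2 ≠ "" then d.modify p.2 [] (fun l => l ++ [pvNorm p.1]) else d) d).getD y []
    = d.getD y [] ++ (cits.filter (fun p => decide (p.1 ≠ "") && decide (p.2 ≠ "") && (p.2 == y))).map (fun p => pvNorm p.1) := by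
  induction cits generalizing d with
  | nil => simp
  | cons q rest ih =>
    obtain ⟨a, yr⟩ := q
    by_cases hg : a ≠ "" ∧ yr ≠ ""
    · rw [List.foldl_cons, if_pos hg, ih]
      by_cases hy : yr = y
      · subst hy
        simp [hg.1, hg.2]
      · rw [PySem.Dict.getD_modify, if_neg (Ne.symm hy)]
        simp [hg.1, hg.2, hy]
    · rw [List.foldl_cons, if_neg hg]
      rw [ih]
      rw [List.filter_cons]
      have hfil : (decide (a ≠ "") && decide (yr ≠ "") && (yr == y)) = false := by
        rcases not_and_or.mp hg with h | h <;> simp [not_ne_iff.mp h]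
      rw [hfil]; simp

lemma pv_loop_year (cits : List (String × String)) (style ra ry : String)
    (hs : style = "APA" ∨ style = "HARVARD" ∨ style = "CHICAGO") (hra : ra ≠ "") :
    pvCitedLoop style ra ry cits
    = cits.any (fun p => decide (p.1 ≠ "") && decide (p.2 ≠ "") && (p.2 == ry) &&
        (PySem.Str.isIn (pvNorm p.1) (PySem.Str.strip (PySem.Str.lower ra)) ||
         PySem.Str.isIn (PySem.Str.strip (PySem.Str.lower ra)) (pvNorm p.1))) := by
  induction cits with
  | nil => rfl
  | cons q rest ih =>
    obtain ⟨a, yr⟩ := q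
    rw [List.any_cons, ← ih]
    show (if style = "APA" ∨ style = "HARVARD" ∨ style = "CHICAGO" then _ else _) = _
    rw [if_pos hs]
    by_cases ha : a = ""
    · simp [ha]
    · by_cases hy : yr = ""
      · simp [hy, ha]
      · by_cases hyy : yr = ry
        · subst hyy
          by_cases ht : (PySem.Str.isIn (pvNorm a) (PySem.Str.strip (PySem.Str.lower ra)) ||
              PySem.Str.isIn (PySem.Str.strip (PySem.Str.lower ra)) (pvNorm a)) = true
          · simp [ha, hy, hra, pvNorm] at ht ⊢
          · simp [ha, hy, hra, pvNorm] at ht ⊢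
        · by_cases hry : ry = ""
          · simp [ha, hy, hra, hry, pvNorm]
          · simp [ha, hy, hra, hry, pvNorm, hyy]

lemma pv_loop_mla (cits : List (String × String)) (ra ry : String) (hra : ra ≠ "") :
    pvCitedLoop "MLA" ra ry cits
    = cits.any (fun p => decide (p.1 ≠ "") &&
        (PySem.Str.isIn (pvNorm p.1) (PySem.Str.strip (PySem.Str.lower ra)) ||
         PySem.Str.isIn (PySem.Str.strip (PySem.Str.lower ra)) (pvNorm p.1))) := by
  induction cits with
  | nil => rfl
  | cons q rest ih =>
    obtain ⟨a, yr⟩ := q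
    rw [List.any_cons, ← ih]
    show (if ("MLA" : String) = "APA" ∨ ("MLA" : String) = "HARVARD" ∨ ("MLA" : String) = "CHICAGO" then _ else _) = _
    rw [if_neg (by decide), if_pos rfl]
    by_cases ha : a = ""
    · simp [ha]
    · by_cases ht : (PySem.Str.isIn (pvNorm a) (PySem.Str.strip (PySem.Str.lower ra)) ||
          PySem.Str.isIn (PySem.Str.strip (PySem.Str.lower ra)) (pvNorm a)) = true
      · simp [ha, hra, pvNorm] at ht ⊢
      · simp [ha, hra, pvNorm] at ht ⊢

lemma pv_loop_other (cits : List (String × String)) (style ra ry : String)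
    (hs : ¬ (style = "APA" ∨ style = "HARVARD" ∨ style = "CHICAGO")) (hm : style ≠ "MLA") :
    pvCitedLoop style ra ry cits = false := by
  induction cits with
  | nil => rfl
  | cons p rest ih => obtain ⟨a, y⟩ := p; simp [pvCitedLoop, hs, hm, ih]

lemma pv_cited_year (citations : List (String × String)) (style ra ry : String)
    (hs : style = "APA" ∨ style = "HARVARD" ∨ style = "CHICAGO") (hra : ra ≠ "") :
    pvCitedLoop style ra ry citations
    = ((citations.foldl (fun d p =>
          if p.1 ≠ "" ∧ p.2 ≠ "" then d.modify p.2 [] (fun l => l ++ [pvNorm p.1]) else d)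
          PySem.Dict.empty).getD ry []).any
        (fun an => PySem.Str.isIn an (PySem.Str.strip (PySem.Str.lower ra)) ||
                   PySem.Str.isIn (PySem.Str.strip (PySem.Str.lower ra)) an) := by
  rw [pv_buckets_getD, PySem.Dict.getD_empty, List.nil_append, pv_loop_year citations style ra ry hs hra,
    List.any_map, List.any_filter]
  simp [Function.comp]

lemma pv_cited_mla (citations : List (String × String)) (ra ry : String) (hra : ra ≠ "") :
    pvCitedLoop "MLA" ra ry citations
    = (citations.filterMap (fun p => if p.1 ≠ "" then some (pvNorm p.1) else none)).any
        (fun an => PySem.Str.isIn an (PySem.Str.strip (PySem.Str.lower ra)) ||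
                   PySem.Str.isIn (PySem.Str.strip (PySem.Str.lower ra)) an) := by
  rw [pv_loop_mla citations ra ry hra, List.any_filterMap]
  congr 1
  funext p
  by_cases hp : p.1 = "" <;> simp [hp]

def pvRA (ref : List (String × String)) : String :=
  let ra0 := (PySem.Dict.mk ref).getD "author" ""
  if ra0 ≠ "" then PySem.Str.strip (((PySem.Str.split? ra0 ",").getD []).headD "") else ra0

def pvTest (ra an : String) : Bool :=
  PySem.Str.isIn an (PySem.Str.strip (PySem.Str.lower ra)) ||
  PySem.Str.isIn (PySem.Str.strip (PySem.Str.lower ra)) an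

def pvPool (citations : List (String × String)) (style ry : String) : List String :=
  if (style == "APA" || style == "HARVARD" || style == "CHICAGO") then
    (if (style == "APA" || style == "HARVARD" || style == "CHICAGO") then
        citations.foldl (fun d p =>
          if p.1 ≠ "" ∧ p.2 ≠ "" then d.modify p.2 [] (fun l => l ++ [pvNorm p.1]) else d) PySem.Dict.empty
      else PySem.Dict.empty).getD ry []
  else if style == "MLA" then citations.filterMap (fun p => if p.1 ≠ "" then some (pvNorm p.1) else none)
  else []

def pvStepA (citations : List (String × String)) (style : String)
    (unused : List (List (String × String))) (ref : List (String × String)) : List (List (String × String)) :=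
  if pvCitedLoop style (pvRA ref) ((PySem.Dict.mk ref).getD "year" "") citations = false ∧
      PySem.Str.strip (pvRA ref) ≠ "" then unused ++ [ref] else unused

def pvPredB (citations : List (String × String)) (style : String) (ref : List (String × String)) : Bool :=
  if pvRA ref = "" then false
  else !((pvPool citations style ((PySem.Dict.mk ref).getD "year" "")).any (fun an => pvTest (pvRA ref) an))

lemma pvA_eq (citations references style) :
    find_references_without_citations_py citations references style
    = references.foldl (pvStepA citations style) [] := rfl

lemma pvB_eq (citations references style) :
    find_references_without_citations_py_alt citations references style
    = references.filter (pvPredB citations style) := rfl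

lemma pv_strip_pvRA (ref : List (String × String)) :
    PySem.Str.strip (pvRA ref) = pvRA ref := by
  unfold pvRA
  by_cases h : ((PySem.Dict.mk ref).getD "author" "" : String) = ""
  · simp [h]; rfl
  · simp [h, pv_strip_idem]

lemma pv_cited_eq (citations : List (String × String)) (style ra ry : String) (hra : ra ≠ "") :
    pvCitedLoop style ra ry citations = (pvPool citations style ry).any (fun an => pvTest ra an) := by
  unfold pvPool pvTest
  by_cases hs : style = "APA" ∨ style = "HARVARD" ∨ style = "CHICAGO"
  · have hb : (style == "APA" || style == "HARVARD" || style == "CHICAGO") = true := by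
      rcases hs with h | h | h <;> simp [h]
    rw [if_pos hb, if_pos hb]
    exact pv_cited_year citations style ra ry hs hra
  · have hb : (style == "APA" || style == "HARVARD" || style == "CHICAGO") = false := by
      rcases not_or.mp hs with ⟨h1, h23⟩; rcases not_or.mp h23 with ⟨h2, h3⟩; simp [h1, h2, h3]
    rw [if_neg (by simp [hb])]
    by_cases hm : style = "MLA"
    · subst hm
      rw [if_pos (by simp)]
      exact pv_cited_mla citations ra ry hra
    · rw [if_neg (by simp [hm])]
      simp [pv_loop_other citations style ra ry hs hm]

lemma pv_step (citations : List (String × String)) (style : String)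
    (acc : List (List (String × String))) (ref : List (String × String)) :
    pvStepA citations style acc ref = if pvPredB citations style ref then acc ++ [ref] else acc := by
  unfold pvStepA pvPredB
  by_cases hra : pvRA ref = ""
  · simp [hra, pv_strip_empty]
  · rw [pv_cited_eq citations style _ _ hra, pv_strip_pvRA, if_neg hra]
    cases h : (pvPool citations style ((PySem.Dict.mk ref).getD "year" "")).any (fun an => pvTest (pvRA ref) an) <;>
      simp [h, hra]

lemma pv_foldl (citations style) : ∀ (refs : List (List (String × String))) (acc),
    refs.foldl (pvStepA citations style) acc = acc ++ refs.filter (pvPredB citations style) := by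
  intro refs
  induction refs with
  | nil => simp
  | cons r rest ih =>
    intro acc
    rw [List.foldl_cons, pv_step, List.filter_cons]
    cases h : pvPredB citations style r <;> simp [h, ih]

-- ===== VERDICT (by name: the statement is the Claim_ definition above) =====
theorem find_references_without_citations_py_spec : Claim_equal_find_references_without_citations_py := by
  intro citations references style _
  unfold Spec_find_references_without_citations_py
  rw [pvA_eq, pvB_eq, pv_foldl, List.nil_append]
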